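-- pv_equiv track=rewrite | github.com/SmallPigPeppa/pl-seg | segmentation/debug_m.py | find_optimal_patch_and_size
-- ===== SOURCE A (Python) =====
-- import math
-- import math
--
-- def find_optimal_patch_and_size(image_size, depth, min_patches=9, max_patches=16):
--     """
--     根据输入的图像尺寸、深度和patch数量范围，找到最优的 patch size 和调整后的 image size。
--
--     参数:
--     image_size (tuple): 输入的图像宽高 (width, height)
--     depth (int): 深度，patch size 必须是 2^depth 的整数倍
--     min_patches (int): 分割后的最小块数
--     max_patches (int): 分割后的最大块数
--
--     返回:
--     tuple: 最优的 patch size 和调整后的 image size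
--     """
--     base = 2 ** depth
--     best_patch_sizes = []
--     best_adjusted_sizes = []
--     best_num_patches = []
--
--     for dimension in image_size:
--         best_patch_diff = float('inf')
--         best_patch_size = None
--         best_adjusted_size = None
--         best_patch_count = None
--
--         # 遍历可能的patch size
--         for patch_size in range(base, dimension + 1, base):
--             num_patches = math.ceil(dimension / patch_size)
--             if min_patches <= num_patches <= max_patches:
--                 adjusted_size = patch_size * num_patches
--                 patch_diff = abs(dimension - adjusted_size)
--
--                 # 寻找变化最小的调整后尺寸
--                 if patch_diff < best_patch_diff:
--                     best_patch_diff = patch_diff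
--                     best_patch_size = patch_size
--                     best_adjusted_size = adjusted_size
--                     best_patch_count = num_patches
--
--         best_patch_sizes.append(best_patch_size)
--         best_adjusted_sizes.append(best_adjusted_size)
--         best_num_patches.append(best_patch_count)
--
--     return best_patch_sizes, best_adjusted_sizes, best_num_patches
-- ===== SOURCE B (Python) =====
-- import math
--
-- def find_optimal_patch_and_size(image_size, depth, min_patches=9, max_patches=16):
--     """Same result as A, but per dimension iterates over the feasible patch
--     COUNTS instead of every multiple of 2**depth up to the dimension; for each
--     count the best patch size is computed directly."""
--     base = 2 ** depth
--     rows = []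
--     for dimension in image_size:
--         best = None  # (diff, patch_size, adjusted_size, num_patches)
--         # descending counts = ascending patch sizes, so strict '<' keeps
--         # the candidate with the smallest patch size on ties, like A.
--         # counts above ceil(dimension / base) are infeasible (patch_size >= base)
--         for n in range(min(max_patches, math.ceil(dimension / base)), max(min_patches, 1) - 1, -1):
--             # smallest multiple of base that yields at most n patches
--             ps = base * max(1, math.ceil(math.ceil(dimension / n) / base))
--             if ps <= dimension and math.ceil(dimension / ps) == n:
--                 diff = ps * n - dimension
--                 if best is None or diff < best[0]:
--                     best = (diff, ps, ps * n, n)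
--         rows.append((None, None, None) if best is None else best[1:])
--     return [r[0] for r in rows], [r[1] for r in rows], [r[2] for r in rows]
-- ===== Notes on version B (the rewrite author's own statement) =====
-- stated objective: alternative
-- what changed: Per dimension, instead of scanning every multiple of 2**depth up to the dimension, B iterates over the feasible patch counts (clipped to min(max_patches, ceil(dimension/2**depth))) and computes the smallest valid patch size for each count directly by ceiling division.
import Mathlib
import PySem

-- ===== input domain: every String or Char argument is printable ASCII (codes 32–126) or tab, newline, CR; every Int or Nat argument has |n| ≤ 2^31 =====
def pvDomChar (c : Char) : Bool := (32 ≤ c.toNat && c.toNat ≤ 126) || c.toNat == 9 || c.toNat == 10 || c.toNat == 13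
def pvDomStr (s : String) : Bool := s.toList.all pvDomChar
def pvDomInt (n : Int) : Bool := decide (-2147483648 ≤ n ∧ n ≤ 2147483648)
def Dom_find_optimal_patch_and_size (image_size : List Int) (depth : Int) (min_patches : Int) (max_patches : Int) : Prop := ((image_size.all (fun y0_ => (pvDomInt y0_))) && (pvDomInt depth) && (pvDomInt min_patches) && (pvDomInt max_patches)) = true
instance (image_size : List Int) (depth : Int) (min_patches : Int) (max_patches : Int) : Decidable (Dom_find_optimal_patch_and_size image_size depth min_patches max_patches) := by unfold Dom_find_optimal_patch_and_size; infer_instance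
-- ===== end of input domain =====

-- B replaces A's scan over every multiple of 2**depth up to the dimension by a scan over the
-- feasible patch counts, computing the smallest valid patch size for each count directly by
-- ceiling division (objective: alternative algorithm, similar measured cost).

-- math.ceil(a / m) for ints with |a|, |m| within the domain: Python's float division is
-- correctly rounded and |a| ≤ 2^31 < 2^53, so the float ceil equals the exact integer
-- ceiling -((-a) // m); both Pythons call it this way.
def pvCeilDiv (a m : Int) : Int := -(PySem.Int.floordiv (-a) m)

-- ===== PORT A =====
-- inner loop body of A: state (best_patch_diff, best_patch_size, best_adjusted_size,
-- best_patch_count); float('inf') is rendered as `none` in the first component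
def pvStepA (d mn mx : Int) (st : Option Int × Option Int × Option Int × Option Int)
    (ps : Int) : Option Int × Option Int × Option Int × Option Int :=
  let n := pvCeilDiv d ps
  if mn ≤ n ∧ n ≤ mx then
    let adj := ps * n
    let diff := |d - adj|
    match st.1 with
    | none => (some diff, some ps, some adj, some n)
    | some bd => if diff < bd then (some diff, some ps, some adj, some n) else st
  else st

-- A's per-dimension loop: for patch_size in range(base, dimension + 1, base)
def pvDimA (d b mn mx : Int) : Option Int × Option Int × Option Int :=
  let st := (PySem.List.pyRange b (d + 1) b).foldl (pvStepA d mn mx) (none, none, none, none)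
  (st.2.1, st.2.2.1, st.2.2.2)

def find_optimal_patch_and_size (image_size : List Int) (depth : Int) (min_patches : Int) (max_patches : Int) : List (Option Int) × List (Option Int) × List (Option Int) :=
  let base : Int := 2 ^ depth.toNat  -- 2 ** depth; Pre_ gives 0 ≤ depth (Python raises below 0)
  image_size.foldl (fun acc d =>
    let r := pvDimA d base min_patches max_patches
    (acc.1 ++ [r.1], acc.2.1 ++ [r.2.1], acc.2.2 ++ [r.2.2])) ([], [], [])

-- ===== PORT B =====
-- inner loop body of B: state = best (diff, patch_size, adjusted, count) or None
def pvBestB (d b : Int) (st : Option (Int × Int × Int × Int)) (n : Int) :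
    Option (Int × Int × Int × Int) :=
  let ps := b * max 1 (pvCeilDiv (pvCeilDiv d n) b)
  if ps ≤ d ∧ pvCeilDiv d ps = n then
    let diff := ps * n - d
    match st with
    | none => some (diff, ps, ps * n, n)
    | some best => if diff < best.1 then some (diff, ps, ps * n, n) else st
  else st

-- B's per-dimension loop:
-- for n in range(min(max_patches, ceil(dimension / base)), max(min_patches, 1) - 1, -1)
def pvDimB (d b mn mx : Int) : Option Int × Option Int × Option Int :=
  match (PySem.List.pyRange (min mx (pvCeilDiv d b)) (max mn 1 - 1) (-1)).foldl (pvBestB d b) none with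
  | none => (none, none, none)
  | some r => (some r.2.1, some r.2.2.1, some r.2.2.2)

def find_optimal_patch_and_size_alt (image_size : List Int) (depth : Int) (min_patches : Int) (max_patches : Int) : List (Option Int) × List (Option Int) × List (Option Int) :=
  let base : Int := 2 ^ depth.toNat
  let rows := image_size.map (fun d => pvDimB d base min_patches max_patches)
  (rows.map (·.1), rows.map (·.2.1), rows.map (·.2.2))

-- ===== PRECONDITION & SPEC =====
-- Pre_ excludes only depth < 0, where Python A raises (2 ** depth is a float and
-- range() rejects it); everywhere else A returns normally.
def Pre_find_optimal_patch_and_size (image_size : List Int) (depth : Int) (min_patches : Int) (max_patches : Int) : Prop := 0 ≤ depth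
instance (image_size : List Int) (depth : Int) (min_patches : Int) (max_patches : Int) : Decidable (Pre_find_optimal_patch_and_size image_size depth min_patches max_patches) := by unfold Pre_find_optimal_patch_and_size; infer_instance

def pvWitness_find_optimal_patch_and_size : List Int × Int × Int × Int := ([224, 224], 2, 9, 16)

def Spec_find_optimal_patch_and_size (image_size : List Int) (depth : Int) (min_patches : Int) (max_patches : Int) (out : List (Option Int) × List (Option Int) × List (Option Int)) : Prop := out = find_optimal_patch_and_size_alt image_size depth min_patches max_patches
instance (image_size : List Int) (depth : Int) (min_patches : Int) (max_patches : Int) (out : List (Option Int) × List (Option Int) × List (Option Int)) : Decidable (Spec_find_optimal_patch_and_size image_size depth min_patches max_patches out) := by unfold Spec_find_optimal_patch_and_size; infer_instance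

-- ===== CLAIM (what is proved, stated in full; the proofs are below) =====
def Claim_equal_find_optimal_patch_and_size : Prop := ∀ (image_size : List Int) (depth : Int) (min_patches : Int) (max_patches : Int), Dom_find_optimal_patch_and_size image_size depth min_patches max_patches → Pre_find_optimal_patch_and_size image_size depth min_patches max_patches → Spec_find_optimal_patch_and_size image_size depth min_patches max_patches (find_optimal_patch_and_size image_size depth min_patches max_patches)

-- ===== LEMMAS AND PROOFS =====

-- the strict-improvement "keep the better candidate" step both loops share
def pvH (st : Option (Int × Int × Int × Int)) (y : Int × Int × Int × Int) :
    Option (Int × Int × Int × Int) :=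
  match st with
  | none => some y
  | some x => if y.1 < x.1 then some y else st

-- candidate-driven form of a loop body: skip where cand rejects, else improve
def pvG (cand : Int → Option (Int × Int × Int × Int))
    (st : Option (Int × Int × Int × Int)) (x : Int) : Option (Int × Int × Int × Int) :=
  match cand x with
  | none => st
  | some y => pvH st y

-- candidate produced by A at patch size ps (none where A's count filter rejects it)
def pvCandA (d mn mx ps : Int) : Option (Int × Int × Int × Int) :=
  let n := pvCeilDiv d ps
  if mn ≤ n ∧ n ≤ mx then some (|d - ps * n|, ps, ps * n, n) else none

-- candidate produced by B at patch count n
def pvCandB (d b n : Int) : Option (Int × Int × Int × Int) :=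
  let ps := b * max 1 (pvCeilDiv (pvCeilDiv d n) b)
  if ps ≤ d ∧ pvCeilDiv d ps = n then some (ps * n - d, ps, ps * n, n) else none

-- A's four-options state is the image of an optional candidate
def pvEnc (st : Option (Int × Int × Int × Int)) :
    Option Int × Option Int × Option Int × Option Int :=
  match st with
  | none => (none, none, none, none)
  | some x => (some x.1, some x.2.1, some x.2.2.1, some x.2.2.2)

theorem pvStepA_enc (d mn mx ps : Int) (st : Option (Int × Int × Int × Int)) :
    pvStepA d mn mx (pvEnc st) ps = pvEnc (pvG (pvCandA d mn mx) st ps) := by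
  cases st <;> unfold pvStepA pvG pvCandA pvEnc pvH <;> dsimp only <;> split_ifs <;> simp_all <;> split_ifs <;> simp_all <;> omega

theorem pvBestB_eq (d b n : Int) (st : Option (Int × Int × Int × Int)) :
    pvBestB d b st n = pvG (pvCandB d b) st n := by
  cases st <;> unfold pvBestB pvG pvCandB pvH <;> dsimp only <;> split_ifs <;> simp_all

theorem pvCeilDiv_le_iff {a m k : Int} (hm : 0 < m) : pvCeilDiv a m ≤ k ↔ a ≤ k * m := by
  have h := (PySem.Int.neg_floordiv_neg_eq_iff_of_pos (a := a) (b := m)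
    (q := pvCeilDiv a m) hm).mp rfl
  constructor
  · intro hk
    calc a ≤ pvCeilDiv a m * m := h.2
    _ ≤ k * m := mul_le_mul_of_nonneg_right hk (le_of_lt hm)
  · intro ha
    by_contra hk
    have h2 : k * m ≤ (pvCeilDiv a m - 1) * m :=
      mul_le_mul_of_nonneg_right (by omega) (le_of_lt hm)
    have := h.1
    omega

theorem pvCeilDiv_spec {a m : Int} (hm : 0 < m) :
    (pvCeilDiv a m - 1) * m < a ∧ a ≤ pvCeilDiv a m * m :=
  (PySem.Int.neg_floordiv_neg_eq_iff_of_pos hm).mp rfl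

-- a valid patch size gives at least one patch
theorem pvValid_one_le {d ps n : Int} (hps : 0 < ps) (hle : ps ≤ d)
    (hc : pvCeilDiv d ps = n) : 1 ≤ n := by
  have h := pvCeilDiv_spec (a := d) (m := ps) hps
  rw [hc] at h
  nlinarith [h.2]

-- facts packed out of a successful pvCandB
theorem pvCandB_some {d b n : Int} {x : Int × Int × Int × Int}
    (hb : 0 < b) (h : pvCandB d b n = some x) :
    b ≤ x.2.1 ∧ x.2.1 ≤ d ∧ pvCeilDiv d x.2.1 = n ∧ b ∣ x.2.1 - b ∧
    x = (x.2.1 * n - d, x.2.1, x.2.1 * n, n) := by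
  unfold pvCandB at h
  dsimp only at h
  split_ifs at h with hcond
  cases h
  refine ⟨?_, hcond.1, hcond.2, ⟨max 1 (pvCeilDiv (pvCeilDiv d n) b) - 1, by ring⟩, rfl⟩
  exact le_mul_of_one_le_right (le_of_lt hb) (le_max_left _ _)

-- pyRange with positive step is strictly increasing
theorem pvRange_pairwise (a c b : Int) (hb : 0 < b) :
    (PySem.List.pyRange a c b).Pairwise (· < ·) := by
  rw [PySem.List.pyRange_of_pos a c hb, List.pairwise_map]
  refine List.pairwise_lt_range.imp ?_
  intro k k' hk
  have : (k : Int) < k' := by exact_mod_cast hk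
  nlinarith

-- countdown range is strictly decreasing
theorem pvRange_neg_pairwise (a c : Int) :
    (PySem.List.pyRange a c (-1)).Pairwise (fun u v => v < u) := by
  rw [PySem.List.pyRange_neg_one, List.pairwise_map]
  refine List.pairwise_lt_range.imp ?_
  intro k k' hk
  have : (k : Int) < k' := by exact_mod_cast hk
  omega

theorem pvCandA_some {d mn mx ps : Int} {x : Int × Int × Int × Int}
    (h : pvCandA d mn mx ps = some x) :
    x.2.1 = ps ∧ pvCeilDiv d ps = x.2.2.2 ∧ mn ≤ x.2.2.2 ∧ x.2.2.2 ≤ mx ∧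
    x = (|d - ps * x.2.2.2|, ps, ps * x.2.2.2, x.2.2.2) := by
  unfold pvCandA at h
  dsimp only at h
  split_ifs at h with hcond
  cases h
  exact ⟨rfl, rfl, hcond.1, hcond.2, rfl⟩

theorem pvFoldA_enc (d mn mx : Int) (L : List Int) (st : Option (Int × Int × Int × Int)) :
    L.foldl (pvStepA d mn mx) (pvEnc st) = pvEnc (L.foldl (pvG (pvCandA d mn mx)) st) := by
  induction L generalizing st with
  | nil => rfl
  | cons x xs ih => simpa [pvStepA_enc] using ih (pvG (pvCandA d mn mx) st x)

theorem pvFoldG (cand : Int → Option (Int × Int × Int × Int)) (L : List Int)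
    (st : Option (Int × Int × Int × Int)) :
    L.foldl (pvG cand) st = (L.filterMap cand).foldl pvH st := by
  induction L generalizing st with
  | nil => rfl
  | cons x xs ih =>
    cases h : cand x <;> simp [pvG, h, ih]

theorem pvFoldH_spec (L : List (Int × Int × Int × Int))
    (hL : L.Pairwise (fun u v => u.2.1 < v.2.1)) :
    (L.foldl pvH none = none ↔ L = []) ∧
    (∀ m, L.foldl pvH none = some m →
      m ∈ L ∧ (∀ y ∈ L, m.1 ≤ y.1) ∧ (∀ y ∈ L, y.2.1 < m.2.1 → m.1 < y.1)) := by
  induction L using List.reverseRecOn with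
  | nil => simp
  | append_singleton L y ih =>
    have hL' : L.Pairwise (fun u v => u.2.1 < v.2.1) := hL.sublist (List.sublist_append_left _ _)
    have hy : ∀ x ∈ L, x.2.1 < y.2.1 := by
      intro x hx
      exact (List.pairwise_append.mp hL).2.2 x hx y (by simp)
    obtain ⟨hnone, hsome⟩ := ih hL'
    rw [List.foldl_append]
    cases hres : L.foldl pvH none with
    | none =>
      have : L = [] := hnone.mp hres
      subst this
      constructor
      · simp [pvH]
      · intro m hm
        simp [pvH] at hm
        subst hm
        simp
    | some r =>
      obtain ⟨hrmem, hrmin, hrfirst⟩ := hsome r hres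
      constructor
      · constructor
        · intro h
          by_cases hlt : y.1 < r.1 <;> simp [pvH, hlt] at h
        · intro h
          simp at h
      · intro m hm
        by_cases hlt : y.1 < r.1
        · simp [pvH, hlt] at hm
          subst hm
          refine ⟨by simp, ?_, ?_⟩
          · intro z hz
            rcases List.mem_append.mp hz with hz | hz
            · exact le_of_lt (lt_of_lt_of_le hlt (hrmin z hz))
            · simp at hz; subst hz; exact le_refl _
          · intro z hz _
            rcases List.mem_append.mp hz with hz | hz
            · exact lt_of_lt_of_le hlt (hrmin z hz)
            · simp at hz; subst hz; omega
        · simp [pvH, hlt] at hm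
          subst hm
          refine ⟨List.mem_append_left _ hrmem, ?_, ?_⟩
          · intro z hz
            rcases List.mem_append.mp hz with hz | hz
            · exact hrmin z hz
            · simp at hz; subst hz; omega
          · intro z hz hzlt
            rcases List.mem_append.mp hz with hz | hz
            · exact hrfirst z hz hzlt
            · simp at hz; subst hz
              exact absurd hzlt (not_lt.mpr (le_of_lt (hy r hrmem)))

theorem pvPos_inj (L : List (Int × Int × Int × Int))
    (hL : L.Pairwise (fun u v => u.2.1 < v.2.1)) :
    ∀ a ∈ L, ∀ b ∈ L, a.2.1 = b.2.1 → a = b := by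
  induction L with
  | nil => simp
  | cons x xs ih =>
    have hp := List.pairwise_cons.mp hL
    intro a ha b hb hab
    rcases List.mem_cons.mp ha with ha1 | ha2
    · rcases List.mem_cons.mp hb with hb1 | hb2
      · rw [ha1, hb1]
      · rw [ha1] at hab
        exact absurd hab (ne_of_lt (hp.1 b hb2))
    · rcases List.mem_cons.mp hb with hb1 | hb2
      · rw [hb1] at hab
        exact absurd hab.symm (ne_of_lt (hp.1 a ha2))
      · exact ih hp.2 a ha2 b hb2 hab

theorem pvFoldH_eq (LA LB : List (Int × Int × Int × Int))
    (hsub : ∀ x ∈ LB, x ∈ LA)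
    (hdom : ∀ y ∈ LA, ∃ x ∈ LB, x.2.1 ≤ y.2.1 ∧ x.1 ≤ y.1)
    (hA : LA.Pairwise (fun u v => u.2.1 < v.2.1))
    (hB : LB.Pairwise (fun u v => u.2.1 < v.2.1)) :
    LA.foldl pvH none = LB.foldl pvH none := by
  obtain ⟨hAnone, hAsome⟩ := pvFoldH_spec LA hA
  obtain ⟨hBnone, hBsome⟩ := pvFoldH_spec LB hB
  cases hra : LA.foldl pvH none with
  | none =>
    have hLA : LA = [] := hAnone.mp hra
    cases hrb : LB.foldl pvH none with
    | none => rfl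
    | some mb =>
      obtain ⟨hmem, -, -⟩ := hBsome mb hrb
      exact absurd (hsub mb hmem) (by simp [hLA])
  | some ma =>
    obtain ⟨hamem, hamin, hafirst⟩ := hAsome ma hra
    cases hrb : LB.foldl pvH none with
    | none =>
      have hLB : LB = [] := hBnone.mp hrb
      obtain ⟨x, hx, -⟩ := hdom ma hamem
      exact absurd hx (by simp [hLB])
    | some mb =>
      obtain ⟨hbmem, hbmin, hbfirst⟩ := hBsome mb hrb
      have hbA : mb ∈ LA := hsub mb hbmem
      have hbminA : ∀ y ∈ LA, mb.1 ≤ y.1 := by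
        intro y hy
        obtain ⟨x, hx, -, hxy⟩ := hdom y hy
        exact le_trans (hbmin x hx) hxy
      have hkey : ma.1 = mb.1 := le_antisymm (hamin mb hbA) (hbminA ma hamem)
      have hpos : ma.2.1 = mb.2.1 := by
        rcases lt_trichotomy ma.2.1 mb.2.1 with h | h | h
        · obtain ⟨x, hx, hxpos, hxkey⟩ := hdom ma hamem
          have : mb.1 < x.1 := hbfirst x hx (lt_of_le_of_lt hxpos h)
          omega
        · exact h
        · have := hafirst mb hbA h
          omega
      exact congrArg some (pvPos_inj LA hA ma hamem mb hbA hpos)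

-- the per-dimension equivalence (b = 2^depth ≥ 1)
theorem pvDim_eq0 (d b mn mx : Int) (hb : 1 ≤ b) :
    ((PySem.List.pyRange b (d + 1) b).filterMap (pvCandA d mn mx)).foldl pvH none
      = ((PySem.List.pyRange (min mx (pvCeilDiv d b)) (max mn 1 - 1) (-1)).filterMap (pvCandB d b)).foldl pvH none := by
  have hb0 : (0:Int) < b := hb
  set R := PySem.List.pyRange b (d + 1) b with hR
  set N := PySem.List.pyRange (min mx (pvCeilDiv d b)) (max mn 1 - 1) (-1) with hN
  -- membership characterizations
  have hRmem : ∀ ps : Int, ps ∈ R ↔ b ≤ ps ∧ ps < d + 1 ∧ b ∣ ps - b := fun ps =>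
    PySem.List.mem_pyRange_iff_of_pos hb0 ps
  have hNmem : ∀ n : Int, n ∈ N ↔ max mn 1 - 1 < n ∧ n ≤ min mx (pvCeilDiv d b) := fun n =>
    PySem.List.mem_pyRange_neg_one
  apply pvFoldH_eq
  · -- LB ⊆ LA
    intro x hx
    obtain ⟨n, hn, hcB⟩ := List.mem_filterMap.mp hx
    obtain ⟨hbps, hpsd, hceil, hdvd, hxeq⟩ := pvCandB_some hb0 hcB
    have hn' := (hNmem n).mp hn
    have hps0 : (0:Int) < x.2.1 := lt_of_lt_of_le hb0 hbps
    have hn1 : 1 ≤ n := pvValid_one_le hps0 hpsd hceil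
    have hspec := pvCeilDiv_spec (a := d) (m := x.2.1) hps0
    rw [hceil] at hspec
    refine List.mem_filterMap.mpr ⟨x.2.1, (hRmem x.2.1).mpr ⟨hbps, by omega, hdvd⟩, ?_⟩
    unfold pvCandA
    dsimp only
    rw [hceil, if_pos (by omega)]
    rw [hxeq]
    have habs : |d - x.2.1 * n| = x.2.1 * n - d := by
      rw [abs_sub_comm, abs_of_nonneg (by nlinarith [hspec.2])]
    rw [habs]
  · -- domination
    intro y hy
    obtain ⟨ps, hpsR, hcA⟩ := List.mem_filterMap.mp hy
    obtain ⟨hpos, hceil, hmn, hmx, hyeq⟩ := pvCandA_some hcA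
    set n := y.2.2.2 with hn
    obtain ⟨hbps, hpsd1, hdvd⟩ := (hRmem ps).mp hpsR
    have hpsd : ps ≤ d := by omega
    have hps0 : (0:Int) < ps := lt_of_lt_of_le hb0 hbps
    have hn1 : 1 ≤ n := pvValid_one_le hps0 hpsd hceil
    have hspecps := pvCeilDiv_spec (a := d) (m := ps) hps0
    rw [hceil] at hspecps
    have hn0 : (0:Int) < n := hn1
    -- q = ceil(d/n), t = ceil(q/b), ps0 = b * max 1 t
    set q := pvCeilDiv d n with hq
    set t := pvCeilDiv q b with ht
    set ps0 := b * max 1 t with hps0def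
    have hspecq := pvCeilDiv_spec (a := d) (m := n) hn0
    have hspect := pvCeilDiv_spec (a := q) (m := b) hb0
    -- q ≤ ps
    have hqps : q ≤ ps := (pvCeilDiv_le_iff hn0).mpr (by nlinarith [hspecps.2])
    -- ps = b * s with s ≥ max 1 t
    obtain ⟨k, hk⟩ := hdvd
    have hs1 : 1 ≤ k + 1 := by nlinarith
    have hts : t ≤ k + 1 := by
      rw [ht]
      exact (pvCeilDiv_le_iff hb0).mpr (by nlinarith)
    have hps0ps : ps0 ≤ ps := by
      have : max 1 t ≤ k + 1 := by omega
      nlinarith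
    have hbps0 : b ≤ ps0 := le_mul_of_one_le_right (le_of_lt hb0) (le_max_left _ _)
    have hps00 : (0:Int) < ps0 := lt_of_lt_of_le hb0 hbps0
    -- q ≤ ps0
    have hqps0 : q ≤ ps0 := by
      have h1 : q ≤ t * b := hspect.2
      have h2 : t * b ≤ max 1 t * b := mul_le_mul_of_nonneg_right (le_max_right _ _) (le_of_lt hb0)
      nlinarith
    -- ceil(d / ps0) = n
    have hceil0 : pvCeilDiv d ps0 = n := by
      have hle : pvCeilDiv d ps0 ≤ n := (pvCeilDiv_le_iff hps00).mpr (by nlinarith [hspecq.2])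
      have hge : ¬ pvCeilDiv d ps0 ≤ n - 1 := by
        rw [pvCeilDiv_le_iff hps00]
        intro hcon
        nlinarith [hspecps.1]
      omega
    have hnceil : n ≤ pvCeilDiv d b := by
      by_contra hc
      have hle : pvCeilDiv d b ≤ n - 1 := by omega
      rw [pvCeilDiv_le_iff hb0] at hle
      nlinarith [hspecps.1]
    have hcB : pvCandB d b n = some (ps0 * n - d, ps0, ps0 * n, n) := by
      unfold pvCandB
      dsimp only
      rw [← hq, ← ht, ← hps0def, if_pos ⟨le_trans hps0ps hpsd, hceil0⟩]
    refine ⟨(ps0 * n - d, ps0, ps0 * n, n), List.mem_filterMap.mpr ⟨n, (hNmem n).mpr (by omega), hcB⟩, ?_, ?_⟩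
    · simpa [hpos] using hps0ps
    · rw [hyeq]
      simp only
      rw [abs_sub_comm, abs_of_nonneg (by nlinarith [hspecps.2])]
      nlinarith
  · -- LA strictly sorted by ps
    rw [List.pairwise_filterMap]
    refine (pvRange_pairwise b (d+1) b hb0).imp ?_
    intro ps ps' hlt x hx x' hx'
    rw [(pvCandA_some hx).1, (pvCandA_some hx').1]
    exact hlt
  · -- LB strictly sorted by ps
    rw [List.pairwise_filterMap]
    refine (pvRange_neg_pairwise (min mx (pvCeilDiv d b)) (max mn 1 - 1)).imp ?_
    intro n n' hlt x hx x' hx'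
    obtain ⟨hbps, hpsd, hceil, -, -⟩ := pvCandB_some hb0 hx
    obtain ⟨hbps', hpsd', hceil', -, -⟩ := pvCandB_some hb0 hx'
    have hps0 : (0:Int) < x.2.1 := lt_of_lt_of_le hb0 hbps
    have hps0' : (0:Int) < x'.2.1 := lt_of_lt_of_le hb0 hbps'
    have hn1' : 1 ≤ n' := pvValid_one_le hps0' hpsd' hceil'
    by_contra hcon
    have hcon' : x'.2.1 ≤ x.2.1 := not_lt.mp hcon
    -- x'.ps ≤ x.ps would give n ≤ n', contradicting n' < n
    have : n ≤ n' := by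
      rw [← hceil, ← hceil']
      apply (pvCeilDiv_le_iff hps0).mpr
      have hspec' := pvCeilDiv_spec (a := d) (m := x'.2.1) hps0'
      rw [hceil'] at hspec'
      nlinarith [hspec'.2]
    omega

-- per-dimension equivalence, stitched together
theorem pvDim_eq (d b mn mx : Int) (hb : 1 ≤ b) : pvDimA d b mn mx = pvDimB d b mn mx := by
  have hA : (PySem.List.pyRange b (d + 1) b).foldl (pvStepA d mn mx) (none, none, none, none)
      = pvEnc (((PySem.List.pyRange b (d + 1) b).filterMap (pvCandA d mn mx)).foldl pvH none) := by
    have h1 := pvFoldA_enc d mn mx (PySem.List.pyRange b (d + 1) b) none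
    rw [pvFoldG] at h1
    simpa using h1
  have hBfun : pvBestB d b = pvG (pvCandB d b) :=
    funext fun st => funext fun n => pvBestB_eq d b n st
  unfold pvDimA pvDimB
  rw [hA, hBfun, pvFoldG, ← pvDim_eq0 d b mn mx hb]
  cases ((PySem.List.pyRange b (d + 1) b).filterMap (pvCandA d mn mx)).foldl pvH none <;> rfl

theorem pv_outer (b mn mx : Int) (L : List Int)
    (acc : List (Option Int) × List (Option Int) × List (Option Int)) :
    L.foldl (fun acc d =>
      let r := pvDimA d b mn mx
      (acc.1 ++ [r.1], acc.2.1 ++ [r.2.1], acc.2.2 ++ [r.2.2])) acc =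
    (acc.1 ++ L.map (fun d => (pvDimA d b mn mx).1),
     acc.2.1 ++ L.map (fun d => (pvDimA d b mn mx).2.1),
     acc.2.2 ++ L.map (fun d => (pvDimA d b mn mx).2.2)) := by
  induction L generalizing acc with
  | nil => simp
  | cons x xs ih => simp [ih]

-- ===== VERDICT (by name: the statement is the Claim_ definition above) =====
theorem find_optimal_patch_and_size_spec : Claim_equal_find_optimal_patch_and_size := by
  intro image_size depth mn mx _ _
  unfold Spec_find_optimal_patch_and_size
  unfold find_optimal_patch_and_size find_optimal_patch_and_size_alt
  rw [pv_outer]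
  have hb : (1 : Int) ≤ 2 ^ depth.toNat := one_le_pow₀ (by norm_num)
  have hdim : ∀ d : Int, pvDimA d (2 ^ depth.toNat) mn mx = pvDimB d (2 ^ depth.toNat) mn mx :=
    fun d => pvDim_eq d _ mn mx hb
  simp only [List.nil_append, List.map_map, Prod.mk.injEq]
  refine ⟨?_, ?_, ?_⟩ <;>
    exact List.map_congr_left fun d _ => by simp [Function.comp, hdim d]
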